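-- pv_equiv track=rewrite | github.com/qcdb/qcdb | qcdb/driver/driver_util.py | get_package2
-- ===== SOURCE A (Python) =====
-- pkgprefix = {'p4-': 'psi4',
--              'c4-': 'cfour',
--              'd3-': 'dftd3',
--              'nwc-': 'nwchem',
--              'gms-': 'gamess',
--             }
--
-- def get_package2(lowername, user_package=None, default_package='psi4'):
--     for k, v in pkgprefix.items():
--         if lowername.startswith(k):
--             package = v
--             break
--     else:
--         package = user_package if user_package else default_package
--
--     return package
-- ===== SOURCE B (Python) =====
-- pkgprefix = {'p4-': 'psi4',
--              'c4-': 'cfour',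
--              'd3-': 'dftd3',
--              'nwc-': 'nwchem',
--              'gms-': 'gamess',
--             }
--
-- def get_package2(lowername, user_package=None, default_package='psi4'):
--     i = lowername.find('-')
--     package = pkgprefix.get(lowername[:i + 1]) if i != -1 else None
--     if package is None:
--         package = user_package if user_package else default_package
--     return package
-- ===== Notes on version B (the rewrite author's own statement) =====
-- stated objective: simpler
-- what changed: Replaces the for/else scan over all prefixes by computing the candidate prefix directly (text up to and including the first '-') and doing one dict lookup, falling back to user_package or default_package when the lookup misses or there is no dash.
import Mathlib
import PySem

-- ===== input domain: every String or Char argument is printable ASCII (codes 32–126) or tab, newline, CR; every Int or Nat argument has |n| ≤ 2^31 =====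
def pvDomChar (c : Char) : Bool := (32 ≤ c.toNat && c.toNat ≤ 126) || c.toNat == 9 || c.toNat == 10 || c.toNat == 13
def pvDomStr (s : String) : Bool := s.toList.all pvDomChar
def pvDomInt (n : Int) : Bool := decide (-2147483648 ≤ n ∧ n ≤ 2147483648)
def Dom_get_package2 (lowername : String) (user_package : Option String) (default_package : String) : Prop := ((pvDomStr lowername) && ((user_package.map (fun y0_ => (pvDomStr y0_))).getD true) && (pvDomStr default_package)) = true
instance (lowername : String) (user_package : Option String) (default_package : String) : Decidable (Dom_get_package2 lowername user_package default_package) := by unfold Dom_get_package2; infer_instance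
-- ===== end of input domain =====

-- B computes the candidate prefix (text up to and including the first '-') and does one dict
-- lookup instead of A's for/else scan over every known prefix; same return value everywhere.

-- module-level constant pkgprefix (dict, as an insertion-ordered association list)
def pkgprefixItems : List (String × String) :=
  [("p4-", "psi4"), ("c4-", "cfour"), ("d3-", "dftd3"), ("nwc-", "nwchem"), ("gms-", "gamess")]

-- ===== PORT A =====
-- the for/else loop: scan the dict items, break at the first key lowername starts with
def scanPrefix (lowername : String) : List (String × String) → Option String
  | [] => none
  | (k, v) :: rest =>
    if PySem.Str.startswith lowername k then some v else scanPrefix lowername rest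

def get_package2 (lowername : String) (user_package : Option String) (default_package : String) : String :=
  match scanPrefix lowername pkgprefixItems with
  | some package => package
  | none =>
    match user_package with           -- package = user_package if user_package else default_package
    | some up => if up = "" then default_package else up
    | none => default_package

-- ===== PORT B =====
def get_package2_alt (lowername : String) (user_package : Option String) (default_package : String) : String :=
  let i := PySem.Str.find lowername "-"
  let package : Option String :=
    if i ≠ -1 then (PySem.Dict.mk pkgprefixItems).get? (PySem.Str.slice lowername none (some (i + 1)))
    else none
  match package with
  | some p => p
  | none =>
    match user_package with           -- user_package if user_package else default_package
    | some up => if up = "" then default_package else up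
    | none => default_package

-- ===== PRECONDITION & SPEC =====
def Spec_get_package2 (lowername : String) (user_package : Option String) (default_package : String) (out : String) : Prop := out = get_package2_alt lowername user_package default_package
instance (lowername : String) (user_package : Option String) (default_package : String) (out : String) : Decidable (Spec_get_package2 lowername user_package default_package out) := by unfold Spec_get_package2; infer_instance

-- ===== CLAIM (what is proved, stated in full; the proofs are below) =====
def Claim_equal_get_package2 : Prop := ∀ (lowername : String) (user_package : Option String) (default_package : String), Dom_get_package2 lowername user_package default_package → Spec_get_package2 lowername user_package default_package (get_package2 lowername user_package default_package)

-- ===== LEMMAS AND PROOFS =====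

-- a dash-terminated key (with no dash inside) is a prefix of l iff l contains a dash and
-- the text of l up to and including its first dash is exactly that key
theorem key_prefix_iff (pre : List Char) (hpre : '-' ∉ pre) (l : List Char) :
    (pre ++ ['-']) <+: l ↔
      0 ≤ PySem.Chars.find l ['-'] ∧
        l.take ((PySem.Chars.find l ['-']).toNat + 1) = pre ++ ['-'] := by
  constructor
  · rintro ⟨rest, hrest⟩
    have hl : l = pre ++ '-' :: rest := by simpa using hrest.symm
    subst hl
    have hinf : ['-'] <:+: pre ++ '-' :: rest := (List.singleton_infix_iff _ _).mpr (by simp)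
    have h0 : 0 ≤ PySem.Chars.find (pre ++ '-' :: rest) ['-'] :=
      (PySem.Chars.find_nonneg_iff _ ['-']).mpr hinf
    obtain ⟨hat, hmin⟩ := PySem.Chars.find_spec h0
    have hEq : (PySem.Chars.find (pre ++ '-' :: rest) ['-']).toNat = pre.length := by
      rcases lt_trichotomy (PySem.Chars.find (pre ++ '-' :: rest) ['-']).toNat pre.length with hlt | heq | hgt
      · exfalso
        set j := (PySem.Chars.find (pre ++ '-' :: rest) ['-']).toNat with hj
        -- the character at the found index is a dash, yet that index lies inside pre
        have hdash : pre[j]'hlt = '-' := by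
          have h1 : (List.drop j (pre ++ '-' :: rest)).head? = some '-' := by
            obtain ⟨t, ht⟩ := hat
            rw [← ht]; simp
          rw [List.head?_drop, List.getElem?_append_left hlt,
              List.getElem?_eq_getElem hlt] at h1
          exact Option.some.inj h1
        exact hpre (hdash ▸ List.getElem_mem hlt)
      · exact heq
      · exact absurd (⟨rest, by simp⟩ : ['-'] <+: List.drop pre.length (pre ++ '-' :: rest)) (hmin pre.length hgt)
    refine ⟨h0, ?_⟩
    rw [hEq]
    simp [List.take_append]
  · rintro ⟨h0, ht⟩
    exact ht ▸ List.take_prefix _ l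

-- the loop of A and the single lookup of B compute the same optional package
theorem option_eq (lowername : String) :
    scanPrefix lowername pkgprefixItems =
      (if PySem.Str.find lowername "-" ≠ -1 then
        (PySem.Dict.mk pkgprefixItems).get?
          (PySem.Str.slice lowername none (some (PySem.Str.find lowername "-" + 1)))
      else none) := by
  by_cases hneg : PySem.Chars.find lowername.toList ['-'] = -1
  · have hno : ∀ pre : List Char, '-' ∉ pre →
        PySem.Chars.startswith lowername.toList (pre ++ ['-']) = false := by
      intro pre hp
      rw [Bool.eq_false_iff, Ne, PySem.Chars.startswith_iff, key_prefix_iff pre hp]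
      rintro ⟨h0, -⟩
      omega
    have s1 : PySem.Chars.startswith lowername.toList ['p','4','-'] = false := by
      simpa using hno ['p','4'] (by decide)
    have s2 : PySem.Chars.startswith lowername.toList ['c','4','-'] = false := by
      simpa using hno ['c','4'] (by decide)
    have s3 : PySem.Chars.startswith lowername.toList ['d','3','-'] = false := by
      simpa using hno ['d','3'] (by decide)
    have s4 : PySem.Chars.startswith lowername.toList ['n','w','c','-'] = false := by
      simpa using hno ['n','w','c'] (by decide)
    have s5 : PySem.Chars.startswith lowername.toList ['g','m','s','-'] = false := by
      simpa using hno ['g','m','s'] (by decide)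
    simp [scanPrefix, pkgprefixItems, PySem.Str.startswith_eq, PySem.Str.find_eq,
          hneg, s1, s2, s3, s4, s5]
  · have h0 : 0 ≤ PySem.Chars.find lowername.toList ['-'] := by
      have := PySem.Chars.neg_one_le_find lowername.toList ['-']
      omega
    have hif : PySem.Str.find lowername "-" ≠ -1 := by
      rw [PySem.Str.find_eq]; simpa using hneg
    -- the lookup key of B is exactly the text up to and including the first dash
    have hkt : (PySem.Str.slice lowername none (some (PySem.Str.find lowername "-" + 1))).toList =
        lowername.toList.take ((PySem.Chars.find lowername.toList ['-']).toNat + 1) := by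
      rw [PySem.Str.toList_slice, PySem.Chars.slice_eq_listSlice, PySem.Str.find_eq,
          show ("-".toList : List Char) = ['-'] from by decide,
          PySem.List.slice_to lowername.toList (by omega)]
      congr 1
      omega
    have hiff : ∀ pre : List Char, '-' ∉ pre →
        (PySem.Chars.startswith lowername.toList (pre ++ ['-']) = true ↔
          lowername.toList.take ((PySem.Chars.find lowername.toList ['-']).toNat + 1) = pre ++ ['-']) := by
      intro pre hp
      rw [PySem.Chars.startswith_iff, key_prefix_iff pre hp]
      exact ⟨fun h => h.2, fun h => ⟨h0, h⟩⟩
    have hne : ∀ k : String,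
        k.toList ≠ lowername.toList.take ((PySem.Chars.find lowername.toList ['-']).toNat + 1) →
        (k == PySem.Str.slice lowername none (some (PySem.Str.find lowername "-" + 1))) = false := by
      intro k hk
      rw [beq_eq_false_iff_ne]
      intro h
      exact hk (by rw [h, hkt])
    have heq : ∀ k : String,
        k.toList = lowername.toList.take ((PySem.Chars.find lowername.toList ['-']).toNat + 1) →
        PySem.Str.slice lowername none (some (PySem.Str.find lowername "-" + 1)) = k := by
      intro k hk
      exact String.toList_inj.mp (by rw [hkt, hk])
    have u1 : PySem.Chars.startswith lowername.toList ['p','4','-'] = true ↔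
        lowername.toList.take ((PySem.Chars.find lowername.toList ['-']).toNat + 1) = ['p','4','-'] := by
      simpa using hiff ['p','4'] (by decide)
    have u2 : PySem.Chars.startswith lowername.toList ['c','4','-'] = true ↔
        lowername.toList.take ((PySem.Chars.find lowername.toList ['-']).toNat + 1) = ['c','4','-'] := by
      simpa using hiff ['c','4'] (by decide)
    have u3 : PySem.Chars.startswith lowername.toList ['d','3','-'] = true ↔
        lowername.toList.take ((PySem.Chars.find lowername.toList ['-']).toNat + 1) = ['d','3','-'] := by
      simpa using hiff ['d','3'] (by decide)
    have u4 : PySem.Chars.startswith lowername.toList ['n','w','c','-'] = true ↔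
        lowername.toList.take ((PySem.Chars.find lowername.toList ['-']).toNat + 1) = ['n','w','c','-'] := by
      simpa using hiff ['n','w','c'] (by decide)
    have u5 : PySem.Chars.startswith lowername.toList ['g','m','s','-'] = true ↔
        lowername.toList.take ((PySem.Chars.find lowername.toList ['-']).toNat + 1) = ['g','m','s','-'] := by
      simpa using hiff ['g','m','s'] (by decide)
    by_cases h1 : lowername.toList.take ((PySem.Chars.find lowername.toList ['-']).toNat + 1) = ['p','4','-']
    · rw [heq "p4-" (by rw [h1]; decide), if_pos hif]
      have t1 : PySem.Chars.startswith lowername.toList ['p','4','-'] = true := u1.mpr h1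
      simp [scanPrefix, pkgprefixItems, PySem.Str.startswith_eq, t1, PySem.Dict.get?]
    · by_cases h2 : lowername.toList.take ((PySem.Chars.find lowername.toList ['-']).toNat + 1) = ['c','4','-']
      · rw [heq "c4-" (by rw [h2]; decide), if_pos hif]
        have t1 : PySem.Chars.startswith lowername.toList ['p','4','-'] = false := by
          rw [Bool.eq_false_iff, Ne, u1]
          exact h1
        have t2 : PySem.Chars.startswith lowername.toList ['c','4','-'] = true := u2.mpr h2
        simp [scanPrefix, pkgprefixItems, PySem.Str.startswith_eq, t1, t2, PySem.Dict.get?]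
      · by_cases h3 : lowername.toList.take ((PySem.Chars.find lowername.toList ['-']).toNat + 1) = ['d','3','-']
        · rw [heq "d3-" (by rw [h3]; decide), if_pos hif]
          have t1 : PySem.Chars.startswith lowername.toList ['p','4','-'] = false := by
            rw [Bool.eq_false_iff, Ne, u1]
            exact h1
          have t2 : PySem.Chars.startswith lowername.toList ['c','4','-'] = false := by
            rw [Bool.eq_false_iff, Ne, u2]
            exact h2
          have t3 : PySem.Chars.startswith lowername.toList ['d','3','-'] = true := u3.mpr h3
          simp [scanPrefix, pkgprefixItems, PySem.Str.startswith_eq, t1, t2, t3, PySem.Dict.get?]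
        · by_cases h4 : lowername.toList.take ((PySem.Chars.find lowername.toList ['-']).toNat + 1) = ['n','w','c','-']
          · rw [heq "nwc-" (by rw [h4]; decide), if_pos hif]
            have t1 : PySem.Chars.startswith lowername.toList ['p','4','-'] = false := by
              rw [Bool.eq_false_iff, Ne, u1]
              exact h1
            have t2 : PySem.Chars.startswith lowername.toList ['c','4','-'] = false := by
              rw [Bool.eq_false_iff, Ne, u2]
              exact h2
            have t3 : PySem.Chars.startswith lowername.toList ['d','3','-'] = false := by
              rw [Bool.eq_false_iff, Ne, u3]
              exact h3
            have t4 : PySem.Chars.startswith lowername.toList ['n','w','c','-'] = true := u4.mpr h4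
            simp [scanPrefix, pkgprefixItems, PySem.Str.startswith_eq, t1, t2, t3, t4, PySem.Dict.get?]
          · by_cases h5 : lowername.toList.take ((PySem.Chars.find lowername.toList ['-']).toNat + 1) = ['g','m','s','-']
            · rw [heq "gms-" (by rw [h5]; decide), if_pos hif]
              have t1 : PySem.Chars.startswith lowername.toList ['p','4','-'] = false := by
                rw [Bool.eq_false_iff, Ne, u1]
                exact h1
              have t2 : PySem.Chars.startswith lowername.toList ['c','4','-'] = false := by
                rw [Bool.eq_false_iff, Ne, u2]
                exact h2
              have t3 : PySem.Chars.startswith lowername.toList ['d','3','-'] = false := by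
                rw [Bool.eq_false_iff, Ne, u3]
                exact h3
              have t4 : PySem.Chars.startswith lowername.toList ['n','w','c','-'] = false := by
                rw [Bool.eq_false_iff, Ne, u4]
                exact h4
              have t5 : PySem.Chars.startswith lowername.toList ['g','m','s','-'] = true := u5.mpr h5
              simp [scanPrefix, pkgprefixItems, PySem.Str.startswith_eq, t1, t2, t3, t4, t5, PySem.Dict.get?]
            · have t1 : PySem.Chars.startswith lowername.toList ['p','4','-'] = false := by
                rw [Bool.eq_false_iff, Ne, u1]
                exact h1
              have t2 : PySem.Chars.startswith lowername.toList ['c','4','-'] = false := by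
                rw [Bool.eq_false_iff, Ne, u2]
                exact h2
              have t3 : PySem.Chars.startswith lowername.toList ['d','3','-'] = false := by
                rw [Bool.eq_false_iff, Ne, u3]
                exact h3
              have t4 : PySem.Chars.startswith lowername.toList ['n','w','c','-'] = false := by
                rw [Bool.eq_false_iff, Ne, u4]
                exact h4
              have t5 : PySem.Chars.startswith lowername.toList ['g','m','s','-'] = false := by
                rw [Bool.eq_false_iff, Ne, u5]
                exact h5
              have n1 := hne "p4-" (by rw [show ("p4-".toList : List Char) = ['p','4','-'] from by decide]; exact fun h => h1 h.symm)
              have n2 := hne "c4-" (by rw [show ("c4-".toList : List Char) = ['c','4','-'] from by decide]; exact fun h => h2 h.symm)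
              have n3 := hne "d3-" (by rw [show ("d3-".toList : List Char) = ['d','3','-'] from by decide]; exact fun h => h3 h.symm)
              have n4 := hne "nwc-" (by rw [show ("nwc-".toList : List Char) = ['n','w','c','-'] from by decide]; exact fun h => h4 h.symm)
              have n5 := hne "gms-" (by rw [show ("gms-".toList : List Char) = ['g','m','s','-'] from by decide]; exact fun h => h5 h.symm)
              rw [if_pos hif]
              have hget : ({ items := pkgprefixItems } : PySem.Dict String String).get?
                  (PySem.Str.slice lowername none (some (PySem.Str.find lowername "-" + 1))) = none := by
                simp only [pkgprefixItems, PySem.Dict.get?_mk_cons, n1, n2, n3, n4, n5,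
                           Bool.false_eq_true, if_false]
                rfl
              rw [hget]
              simp [scanPrefix, pkgprefixItems, PySem.Str.startswith_eq, t1, t2, t3, t4, t5]

-- ===== VERDICT (by name: the statement is the Claim_ definition above) =====
theorem get_package2_spec : Claim_equal_get_package2 := by
  intro lowername user_package default_package _
  unfold Spec_get_package2 get_package2 get_package2_alt
  rw [option_eq]
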